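-- pv_equiv track=rewrite | github.com/MarcoGDallAlba/Progetti | programmino.py | trovaeluguali
-- ===== SOURCE A (Python) =====
-- def trovaeluguali(l):
--     cop=[]
--     for j in range(0,len(l)):
--         eluguali=1
--         for p in range(0,len(l)):
--             if j==p:
--                 pass
--             else:
--                 if l[j]==l[p]:
--                     eluguali+=1
--         if eluguali!=1 and not([l[j],eluguali] in cop):
--             cop+=[[l[j],eluguali]]
--     return cop
-- ===== SOURCE B (Python) =====
-- def trovaeluguali(l):
--     acc = []  # list of (value, count) in first-appearance order
--     for x in l:
--         for i, (v, c) in enumerate(acc):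
--             if v == x:
--                 acc[i] = (v, c + 1)
--                 break
--         else:
--             acc.append((x, 1))
--     return [[v, c] for (v, c) in acc if c > 1]
-- ===== Notes on version B (the rewrite author's own statement) =====
-- stated objective: faster
-- what changed: Single accumulation pass maintaining (value,count) pairs followed by a filter, instead of a full recount of the whole list for every position plus a membership dedup check.
import Mathlib
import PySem

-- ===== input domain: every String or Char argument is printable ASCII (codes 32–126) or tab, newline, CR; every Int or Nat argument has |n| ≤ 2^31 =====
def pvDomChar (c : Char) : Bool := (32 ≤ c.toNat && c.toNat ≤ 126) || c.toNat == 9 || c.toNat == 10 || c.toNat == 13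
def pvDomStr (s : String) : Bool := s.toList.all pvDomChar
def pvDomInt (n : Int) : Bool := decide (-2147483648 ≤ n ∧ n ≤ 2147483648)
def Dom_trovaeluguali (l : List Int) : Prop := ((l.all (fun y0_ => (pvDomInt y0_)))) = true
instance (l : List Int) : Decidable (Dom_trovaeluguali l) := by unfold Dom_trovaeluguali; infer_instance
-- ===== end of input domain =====

-- B replaces A's per-position full recount + membership dedup with a single accumulation
-- pass over (value,count) pairs followed by a filter (objective: faster by a constant/
-- distinct-value factor; both programs return the same list).

-- ===== PORT A =====
-- literal port of A: for each index j recount the whole list, then conditionally append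
def trovaeluguali (l : List Int) : List (List Int) :=
  (PySem.List.pyRange 0 (l.length : Int) 1).foldl (fun cop j =>
    let eluguali : Int :=
      (PySem.List.pyRange 0 (l.length : Int) 1).foldl (fun e p =>
        if j == p then e
        else if PySem.List.pyGetD l j 0 == PySem.List.pyGetD l p 0 then e + 1 else e) 1
    if eluguali != 1 && !(cop.contains [PySem.List.pyGetD l j 0, eluguali]) then
      cop ++ [[PySem.List.pyGetD l j 0, eluguali]]
    else cop) []

-- ===== PORT B =====
-- the inner linear scan of Source B (find entry with v == x, increment, else append (x,1))
def pvBump (acc : List (Int × Int)) (x : Int) : List (Int × Int) :=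
  match acc with
  | [] => [(x, 1)]
  | (v, c) :: rest => if v == x then (v, c + 1) :: rest else (v, c) :: pvBump rest x

def trovaeluguali_alt (l : List Int) : List (List Int) :=
  ((l.foldl pvBump []).filter (fun e => 1 < e.2)).map (fun e => [e.1, e.2])

-- ===== PRECONDITION & SPEC =====
def Spec_trovaeluguali (l : List Int) (out : List (List Int)) : Prop := out = trovaeluguali_alt l
instance (l : List Int) (out : List (List Int)) : Decidable (Spec_trovaeluguali l out) := by unfold Spec_trovaeluguali; infer_instance

-- ===== CLAIM (what is proved, stated in full; the proofs are below) =====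
def Claim_equal_trovaeluguali : Prop := ∀ (l : List Int), Dom_trovaeluguali l → Spec_trovaeluguali l (trovaeluguali l)

-- ===== LEMMAS AND PROOFS =====

-- first occurrences of l's values, in order
def pvStep (acc : List Int) (x : Int) : List Int := if x ∈ acc then acc else acc ++ [x]
def pvFirsts (l : List Int) : List Int := l.foldl pvStep []

-- the common normal form both ports are reduced to
def pvC (l : List Int) : List (List Int) :=
  ((pvFirsts l).filter (fun v => 1 < (l.count v : Int))).map (fun v => [v, (l.count v : Int)])

lemma mem_foldl_pvStep (l : List Int) (acc : List Int) (y : Int) :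
    y ∈ l.foldl pvStep acc ↔ y ∈ acc ∨ y ∈ l := by
  induction l generalizing acc with
  | nil => simp
  | cons x xs ih =>
    simp only [List.foldl_cons, ih, pvStep]
    split_ifs with h
    · simp only [List.mem_cons]
      constructor
      · tauto
      · rintro (h1 | h1 | h1)
        · tauto
        · exact Or.inl (h1 ▸ h)
        · tauto
    · simp only [List.mem_append, List.mem_cons]
      tauto

lemma mem_pvFirsts (l : List Int) (y : Int) : y ∈ pvFirsts l ↔ y ∈ l := by
  simp [pvFirsts, mem_foldl_pvStep]

lemma pvFirsts_append_singleton (s : List Int) (a : Int) :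
    pvFirsts (s ++ [a]) = if a ∈ s then pvFirsts s else pvFirsts s ++ [a] := by
  simp [pvFirsts, List.foldl_append, pvStep, mem_foldl_pvStep]

-- inner loop of A = total count of l[j] in l
lemma pvInner (l : List Int) (j : Nat) (hj : j < l.length) (n : Nat) (hn : n ≤ l.length) :
    (PySem.List.pyRange 0 (n : Int) 1).foldl (fun e p =>
        if (j : Int) == p then e
        else if PySem.List.pyGetD l (j : Int) 0 == PySem.List.pyGetD l p 0 then e + 1 else e) 1
      = 1 + ((l.take n).count l[j] : Int) - (if j < n then 1 else 0) := by
  induction n with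
  | zero => simp [PySem.List.pyRange_one_eq_nil]
  | succ m ih =>
    have hm : m ≤ l.length := Nat.le_of_succ_le hn
    have hmlt : m < l.length := hn
    have hcast : ((m + 1 : Nat) : Int) = (m : Int) + 1 := by push_cast; ring
    rw [hcast, PySem.List.pyRange_one_succ_right (by positivity), List.foldl_append,
      List.foldl_cons, List.foldl_nil, ih hm]
    have htake : l.take (m + 1) = l.take m ++ [l[m]] := by
      rw [List.take_add_one]
      simp [List.getElem?_eq_getElem hmlt]
    have hgj : PySem.List.pyGetD l (j : Int) 0 = l[j] := by
      simp [List.getElem?_eq_getElem hj]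
    have hgm : PySem.List.pyGetD l (m : Int) 0 = l[m] := by
      simp [List.getElem?_eq_getElem hmlt]
    rw [hgj, hgm, htake, List.count_append]
    by_cases hjm : j = m
    · subst hjm
      simp only [beq_self_eq_true, if_true, List.count_cons, List.count_nil]
      push_cast
      omega
    · have hne : ((j : Int) == (m : Int)) = false := by
        simp
        omega
      rw [hne]
      simp only [Bool.false_eq_true, if_false]
      by_cases hval : l[j] = l[m]
      · rw [if_pos (by exact beq_iff_eq.mpr hval)]
        have hc1 : List.count l[j] [l[m]] = 1 := by
          simp [hval]
        rw [hc1]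
        push_cast
        omega
      · have hcond : (l[j] == l[m]) = false := beq_eq_false_iff_ne.mpr hval
        rw [hcond]
        simp only [Bool.false_eq_true, if_false]
        have hc0 : [l[m]].count l[j] = 0 := by
          simp [List.count_cons]
          exact fun h => hval h.symm
        rw [hc0]
        push_cast
        omega

-- outer loop of A builds pvC of the processed prefix (counts over the whole list)
lemma pvOuter (l : List Int) (n : Nat) (hn : n ≤ l.length) :
    (PySem.List.pyRange 0 (n : Int) 1).foldl (fun cop j =>
      let eluguali : Int :=
        (PySem.List.pyRange 0 (l.length : Int) 1).foldl (fun e p =>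
          if j == p then e
          else if PySem.List.pyGetD l j 0 == PySem.List.pyGetD l p 0 then e + 1 else e) 1
      if eluguali != 1 && !(cop.contains [PySem.List.pyGetD l j 0, eluguali]) then
        cop ++ [[PySem.List.pyGetD l j 0, eluguali]]
      else cop) []
    = ((pvFirsts (l.take n)).filter (fun v => 1 < (l.count v : Int))).map
        (fun v => [v, (l.count v : Int)]) := by
  induction n with
  | zero => simp [PySem.List.pyRange_one_eq_nil, pvFirsts]
  | succ m ih =>
    have hm : m ≤ l.length := Nat.le_of_succ_le hn
    have hmlt : m < l.length := hn
    have hcast : ((m + 1 : Nat) : Int) = (m : Int) + 1 := by push_cast; ring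
    rw [hcast, PySem.List.pyRange_one_succ_right (by positivity), List.foldl_append,
      List.foldl_cons, List.foldl_nil, ih hm]
    have hgm : PySem.List.pyGetD l (m : Int) 0 = l[m] := by
      simp [List.getElem?_eq_getElem hmlt]
    have hinner := pvInner l m hmlt l.length le_rfl
    rw [List.take_length, if_pos hmlt] at hinner
    have hinner' : (PySem.List.pyRange 0 (l.length : Int) 1).foldl (fun e p =>
        if (m : Int) == p then e
        else if PySem.List.pyGetD l (m : Int) 0 == PySem.List.pyGetD l p 0 then e + 1 else e) 1
        = (l.count l[m] : Int) := by
      rw [hinner]; ring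
    simp only []
    rw [hinner', hgm]
    have htake : l.take (m + 1) = l.take m ++ [l[m]] := by
      rw [List.take_add_one]
      simp [List.getElem?_eq_getElem hmlt]
    rw [htake, pvFirsts_append_singleton]
    have hposc : 0 < l.count l[m] := List.count_pos_iff.mpr (l.getElem_mem hmlt)
    have hmem : ([l[m], (l.count l[m] : Int)] ∈
        ((pvFirsts (l.take m)).filter (fun v => 1 < (l.count v : Int))).map
          (fun v => [v, (l.count v : Int)])) ↔ (l[m] ∈ l.take m ∧ 1 < l.count l[m]) := by
      simp only [List.mem_map, List.mem_filter, mem_pvFirsts, decide_eq_true_eq]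
      constructor
      · rintro ⟨v, ⟨hv, hlt⟩, heq⟩
        have hv_eq : v = l[m] := by injection heq
        subst hv_eq
        exact ⟨hv, by exact_mod_cast hlt⟩
      · rintro ⟨h1, h2⟩
        exact ⟨l[m], ⟨h1, by exact_mod_cast h2⟩, rfl⟩

    by_cases hc : 1 < l.count l[m]
    · have hne1 : ((l.count l[m] : Int) != 1) = true := by
        simp; omega
      by_cases hmt : l[m] ∈ l.take m
      · rw [if_pos hmt]
        have : ([l[m], (l.count l[m] : Int)] ∈
            ((pvFirsts (l.take m)).filter (fun v => 1 < (l.count v : Int))).map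
              (fun v => [v, (l.count v : Int)])) := hmem.mpr ⟨hmt, hc⟩
        have hcont : (((pvFirsts (l.take m)).filter (fun v => 1 < (l.count v : Int))).map
            (fun v => [v, (l.count v : Int)])).contains [l[m], (l.count l[m] : Int)] = true := by
          rw [List.contains_iff_mem]
          exact hmem.mpr ⟨hmt, hc⟩
        rw [hcont]
        simp
      · rw [if_neg hmt]
        have hcont : (((pvFirsts (l.take m)).filter (fun v => 1 < (l.count v : Int))).map
            (fun v => [v, (l.count v : Int)])).contains [l[m], (l.count l[m] : Int)] = false := by
          refine Bool.eq_false_iff.mpr ?_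
          intro h
          exact hmt (hmem.mp (List.contains_iff_mem.mp h)).1
        rw [hcont, hne1]
        simp only [Bool.not_false, Bool.and_self, if_true]
        rw [List.filter_append, List.map_append]
        have hfil : ([l[m]].filter (fun v => 1 < (l.count v : Int))) = [l[m]] := by
          simp only [List.filter_cons, List.filter_nil]
          rw [if_pos (by simp; exact_mod_cast hc)]
        rw [hfil]
        simp
    · have hcnt1 : l.count l[m] = 1 := by omega
      have hne1 : ((l.count l[m] : Int) != 1) = false := by simp [hcnt1]
      rw [hne1]
      simp only [Bool.false_and, Bool.false_eq_true, if_false]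
      by_cases hmt : l[m] ∈ l.take m
      · rw [if_pos hmt]
      · rw [if_neg hmt, List.filter_append, List.map_append]
        have hfil : ([l[m]].filter (fun v => 1 < (l.count v : Int))) = [] := by
          simp only [List.filter_cons, List.filter_nil]
          rw [if_neg (by simp [hcnt1])]
        rw [hfil]
        simp

lemma pvA_eq_pvC (l : List Int) : trovaeluguali l = pvC l := by
  have h := pvOuter l l.length le_rfl
  simpa [trovaeluguali, pvC] using h

-- B side: the accumulator is exactly the (value, count-so-far) table
def pvTable (p : List Int) : List (Int × Int) :=
  (pvFirsts p).map (fun v => (v, (p.count v : Int)))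

lemma nodup_foldl_pvStep (l : List Int) (acc : List Int) (h : acc.Nodup) :
    (l.foldl pvStep acc).Nodup := by
  induction l generalizing acc with
  | nil => exact h
  | cons x xs ih =>
    simp only [List.foldl_cons, pvStep]
    split_ifs with hx
    · exact ih acc h
    · refine ih _ ?_
      simp only [List.nodup_append, List.nodup_singleton, true_and, h]
      intro a ha b hb
      rw [List.mem_singleton.mp hb]
      exact fun hax => hx (hax ▸ ha)

lemma nodup_pvFirsts (l : List Int) : (pvFirsts l).Nodup :=
  nodup_foldl_pvStep l [] List.nodup_nil

lemma pvBump_map_of_not_mem (vs : List Int) (g : Int → Int) (x : Int) (hx : x ∉ vs) :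
    pvBump (vs.map fun v => (v, g v)) x = vs.map (fun v => (v, g v)) ++ [(x, 1)] := by
  induction vs with
  | nil => rfl
  | cons v vs ih =>
    have hvx : (v == x) = false :=
      beq_eq_false_iff_ne.mpr (fun h => hx (h ▸ List.mem_cons_self))
    simp only [List.map_cons, pvBump, hvx, Bool.false_eq_true, if_false, List.cons_append,
      List.cons.injEq, true_and]
    exact ih (fun h => hx (List.mem_cons_of_mem _ h))

lemma pvBump_map_of_mem (vs : List Int) (g : Int → Int) (x : Int) (hnd : vs.Nodup)
    (hx : x ∈ vs) :
    pvBump (vs.map fun v => (v, g v)) x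
      = vs.map (fun v => (v, g v + if v = x then 1 else 0)) := by
  induction vs with
  | nil => cases hx
  | cons v vs ih =>
    by_cases hvx : v = x
    · subst hvx
      simp only [List.map_cons, pvBump, beq_self_eq_true, if_true]
      congr 1
      apply List.map_congr_left
      intro w hw
      have hwv : ¬ w = v := fun h => (List.nodup_cons.mp hnd).1 (h ▸ hw)
      simp [hwv]
    · have hvx' : (v == x) = false := beq_eq_false_iff_ne.mpr hvx
      have hx' : x ∈ vs := by
        rcases List.mem_cons.mp hx with h | h
        · exact absurd h.symm hvx
        · exact h
      simp only [List.map_cons, pvBump, hvx', Bool.false_eq_true, if_false, if_neg hvx,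
        add_zero]
      congr 1
      exact ih (List.nodup_cons.mp hnd).2 hx'

lemma pvBump_table (p : List Int) (x : Int) :
    pvBump (pvTable p) x = pvTable (p ++ [x]) := by
  unfold pvTable
  by_cases hx : x ∈ p
  · have hxf : x ∈ pvFirsts p := (mem_pvFirsts _ _).mpr hx
    rw [pvBump_map_of_mem _ _ _ (nodup_pvFirsts p) hxf, pvFirsts_append_singleton, if_pos hx]
    apply List.map_congr_left
    intro v hv
    have : (p ++ [x]).count v = p.count v + if v = x then 1 else 0 := by
      rw [List.count_append]
      simp only [List.count_cons, List.count_nil, Nat.zero_add]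
      congr 1
      by_cases hvx : v = x
      · simp [hvx]
      · rw [if_neg hvx, if_neg (by simp; exact fun h => hvx h.symm)]
    rw [this]
    by_cases hvx : v = x <;> simp [hvx]
  · have hxf : x ∉ pvFirsts p := fun h => hx ((mem_pvFirsts _ _).mp h)
    rw [pvBump_map_of_not_mem _ _ _ hxf, pvFirsts_append_singleton, if_neg hx, List.map_append]
    congr 1
    · apply List.map_congr_left
      intro v hv
      have hvx : ¬ v = x := fun h => hx (h ▸ (mem_pvFirsts _ _).mp hv)
      have hcv : List.count v [x] = 0 := by
        rw [List.count_eq_zero]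
        simp [hvx]
      have : (p ++ [x]).count v = p.count v := by
        rw [List.count_append, hcv, Nat.add_zero]
      rw [this]

    · have hc0 : List.count x p = 0 := List.count_eq_zero_of_not_mem hx
      have : (p ++ [x]).count x = 1 := by
        rw [List.count_append, hc0]
        simp
      simp [hc0]

lemma pvFoldl_bump (r p : List Int) :
    r.foldl pvBump (pvTable p) = pvTable (p ++ r) := by
  induction r generalizing p with
  | nil => simp
  | cons x xs ih =>
    simp only [List.foldl_cons, pvBump_table, ih]
    simp

lemma pvB_eq_pvC (l : List Int) : trovaeluguali_alt l = pvC l := by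
  have h : l.foldl pvBump [] = pvTable l := by
    have := pvFoldl_bump l []
    simpa [pvTable, pvFirsts] using this
  simp only [trovaeluguali_alt, h, pvTable, pvC, List.filter_map, List.map_map]
  rfl

-- ===== VERDICT (by name: the statement is the Claim_ definition above) =====
theorem trovaeluguali_spec : Claim_equal_trovaeluguali := by
  intro l _
  unfold Spec_trovaeluguali
  rw [pvA_eq_pvC, pvB_eq_pvC]
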